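-- pv_equiv track=rewrite | github.com/IES-Rafael-Alberti/1dawb-u2-excepciones-depuraci-n-y-documentaci-n-Eperyaq | src/ejercicios_3_1_7.py | calculoLista
-- ===== SOURCE A (Python) =====
-- def calculoLista(abecedario: list):
--     cont = 0
--     max = len(abecedario) - 1
--     while cont <= max:
--         if cont % 3 == 0:
--             abecedario.pop(cont)
--             max -= 1
--         cont += 1
--
--     return abecedario
-- ===== SOURCE B (Python) =====
-- def calculoLista(abecedario: list):
--     # One pass: the shifting pop-at-multiples-of-3 scheme removes exactly the
--     # elements whose ORIGINAL index is divisible by 4. Mutates in place like A.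
--     abecedario[:] = [x for i, x in enumerate(abecedario) if i % 4 != 0]
--     return abecedario
-- ===== Notes on version B (the rewrite author's own statement) =====
-- stated objective: faster
-- what changed: Replaces the mutate-while-scanning loop (pop at shifting multiple-of-3 positions, each pop shifting the tail) with a single pass keeping exactly the elements whose original index is not divisible by 4.
import Mathlib
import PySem

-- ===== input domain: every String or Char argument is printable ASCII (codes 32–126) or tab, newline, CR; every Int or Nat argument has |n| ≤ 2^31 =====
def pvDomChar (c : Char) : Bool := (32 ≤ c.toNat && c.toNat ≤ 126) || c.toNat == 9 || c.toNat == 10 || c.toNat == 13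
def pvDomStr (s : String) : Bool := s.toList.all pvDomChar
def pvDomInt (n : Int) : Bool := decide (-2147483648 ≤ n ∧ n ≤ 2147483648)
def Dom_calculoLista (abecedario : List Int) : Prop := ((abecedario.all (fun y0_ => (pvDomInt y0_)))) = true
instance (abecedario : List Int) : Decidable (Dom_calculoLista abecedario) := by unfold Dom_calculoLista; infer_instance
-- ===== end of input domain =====

-- B replaces A's quadratic mutate-while-scanning pop loop by one pass keeping the
-- elements whose original index is not divisible by 4 (faster). A mutates its
-- argument in place; the equivalence proved here is about the RETURN value only
-- (Python B performs the same in-place replacement).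

-- ===== PORT A =====
-- the while loop of A: state (abecedario, cont, max); pop at cont when cont % 3 == 0
def calculoListaLoop (abecedario : List Int) (cont mx : Int) : List Int :=
  if _h : cont ≤ mx then
    if cont % 3 = 0 then   -- Lean Int % = Python % here: divisor 3 is positive
      match PySem.List.pop? abecedario cont with
      | some (_, l') => calculoListaLoop l' (cont + 1) (mx - 1)
      | none => abecedario   -- unreachable totalization guard (pop index always in range)
    else calculoListaLoop abecedario (cont + 1) mx
  else abecedario
termination_by (mx - cont + 1).toNat
decreasing_by
  · omega
  · omega

def calculoLista (abecedario : List Int) : List Int :=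
  calculoListaLoop abecedario 0 ((abecedario.length : Int) - 1)

-- ===== PORT B =====
def calculoLista_alt (abecedario : List Int) : List Int :=
  ((PySem.List.enumerate abecedario 0).filter (fun p => p.1 % 4 != 0)).map (·.2)  -- divisor 4 positive: Int % = Python %

-- ===== PRECONDITION & SPEC =====
def Spec_calculoLista (abecedario : List Int) (out : List Int) : Prop := out = calculoLista_alt abecedario
instance (abecedario : List Int) (out : List Int) : Decidable (Spec_calculoLista abecedario out) := by unfold Spec_calculoLista; infer_instance

-- ===== CLAIM (what is proved, stated in full; the proofs are below) =====
def Claim_equal_calculoLista : Prop := ∀ (abecedario : List Int), Dom_calculoLista abecedario → Spec_calculoLista abecedario (calculoLista abecedario)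

-- ===== LEMMAS AND PROOFS =====

-- abstract description of what A's loop does to the untouched suffix at counter c
def pvG : List Int → Int → List Int
  | [], _ => []
  | x :: rest, c =>
    if c % 3 = 0 then
      match rest with
      | [] => []
      | y :: rest' => y :: pvG rest' (c + 1)
    else x :: pvG rest (c + 1)

-- B's comprehension with the enumeration started at k
def pvH (l : List Int) (k : Int) : List Int :=
  ((PySem.List.enumerate l k).filter (fun p => p.1 % 4 != 0)).map (·.2)  -- divisor 4 positive: Int % = Python %

theorem pvG_cons_not (x c : Int) (rest : List Int) (h : ¬ c % 3 = 0) :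
    pvG (x :: rest) c = x :: pvG rest (c + 1) := by
  rw [pvG.eq_def]; simp [h]

theorem pvG_one (x c : Int) (h : c % 3 = 0) : pvG [x] c = [] := by
  rw [pvG.eq_def]; simp [h]

theorem pvG_two (x y c : Int) (rest : List Int) (h : c % 3 = 0) :
    pvG (x :: y :: rest) c = y :: pvG rest (c + 1) := by
  rw [pvG.eq_def]; simp [h]

theorem pvEraseIdx_mid (pre rest : List Int) (x : Int) :
    (pre ++ x :: rest).eraseIdx pre.length = pre ++ rest := by
  induction pre with
  | nil => simp
  | cons a t ih => simp [ih]

theorem pvPop_mid (pre rest : List Int) (x : Int) (c : Int) (hc : (pre.length : Int) = c) :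
    PySem.List.pop? (pre ++ x :: rest) c = some (x, pre ++ rest) := by
  have h : pre.length < (pre ++ x :: rest).length := by simp
  rw [← hc, PySem.List.pop?_natCast _ _ h, pvEraseIdx_mid]
  simp [List.getElem_append_right]

theorem pvLoop_eq_g (n : Nat) :
    ∀ (suffix pre : List Int) (c : Int), suffix.length = n → 0 ≤ c →
      (pre.length : Int) = c →
      calculoListaLoop (pre ++ suffix) c ((pre.length : Int) + suffix.length - 1)
        = pre ++ pvG suffix c := by
  induction n using Nat.strong_induction_on with
  | _ n ih =>
  intro suffix pre c hl hc0 hc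
  match suffix, hl with
  | [], hl =>
    rw [calculoListaLoop]
    rw [dif_neg (by simp only [List.length_nil]; omega)]
    simp [pvG]
  | x :: rest, hl =>
    rw [calculoListaLoop]
    rw [dif_pos (by simp only [List.length_cons]; push_cast; omega)]
    by_cases h3 : c % 3 = 0
    · rw [if_pos h3, pvPop_mid pre rest x c hc]
      show calculoListaLoop (pre ++ rest) (c + 1)
          ((pre.length : Int) + ((x :: rest : List Int).length : Int) - 1 - 1)
        = pre ++ pvG (x :: rest) c
      match rest with
      | [] =>
        rw [calculoListaLoop]
        rw [dif_neg (by simp only [List.length_cons, List.length_nil]; omega)]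
        rw [pvG_one x c h3]
      | y :: rest' =>
        have hlen : rest'.length < n := by simp at hl; omega
        have hrec := ih rest'.length hlen rest' (pre ++ [y]) (c + 1) rfl (by omega)
          (by simp [← hc])
        simp only [List.append_assoc, List.cons_append, List.nil_append] at hrec
        have harith : (pre.length : Int) + ((x :: y :: rest' : List Int).length : Int) - 1 - 1
            = ((pre ++ [y]).length : Int) + (rest'.length : Int) - 1 := by
          simp only [List.length_cons, List.length_append, List.length_nil]; omega
        rw [harith, hrec, pvG_two x y c rest' h3]
    · rw [if_neg h3]
      have hlen : rest.length < n := by simp at hl; omega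
      have hrec := ih rest.length hlen rest (pre ++ [x]) (c + 1) rfl (by omega)
        (by simp [← hc])
      simp only [List.append_assoc, List.cons_append, List.nil_append] at hrec
      have harith : (pre.length : Int) + ((x :: rest : List Int).length : Int) - 1
          = ((pre ++ [x]).length : Int) + (rest.length : Int) - 1 := by
        simp only [List.length_cons, List.length_append, List.length_nil]; omega
      rw [harith, hrec, pvG_cons_not x c rest h3]

theorem pvG_eq_H (n : Nat) :
    ∀ (l : List Int) (c k : Int), l.length = n → c % 3 = 0 → k % 4 = 0 →
      pvG l c = pvH l k := by
  induction n using Nat.strong_induction_on with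
  | _ n ih =>
  intro l c k hl hc hk
  have hc1 : ¬ (c + 1) % 3 = 0 := by omega
  have hc2 : ¬ (c + 1 + 1) % 3 = 0 := by omega
  have hk1 : (k + 1) % 4 ≠ 0 := by omega
  have hk2 : (k + 1 + 1) % 4 ≠ 0 := by omega
  have hk3 : (k + 1 + 1 + 1) % 4 ≠ 0 := by omega
  match l with
  | [] => simp [pvG, pvH, PySem.List.enumerate_nil]
  | [a] =>
    rw [pvG_one a c hc]
    simp [pvH, PySem.List.enumerate_cons, PySem.List.enumerate_nil, hk]
  | a :: b :: rest2 =>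
    rw [pvG_two a b c rest2 hc]
    match rest2 with
    | [] =>
      simp [pvG, pvH, PySem.List.enumerate_cons, PySem.List.enumerate_nil, hk, hk1]
    | [x] =>
      rw [pvG_cons_not x (c + 1) [] hc1]
      simp [pvG, pvH, PySem.List.enumerate_cons, PySem.List.enumerate_nil, hk, hk1, hk2]
    | x :: y :: rest =>
      rw [pvG_cons_not x (c + 1) (y :: rest) hc1, pvG_cons_not y (c + 1 + 1) rest hc2]
      have hlen : rest.length < n := by simp at hl; omega
      have h4 := ih rest.length hlen rest (c + 1 + 1 + 1) (k + 1 + 1 + 1 + 1) rfl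
        (by omega) (by omega)
      rw [h4]
      simp [pvH, PySem.List.enumerate_cons, hk, hk1, hk2, hk3]

-- ===== VERDICT (by name: the statement is the Claim_ definition above) =====
theorem calculoLista_spec : Claim_equal_calculoLista := by
  intro l _
  unfold Spec_calculoLista calculoLista
  have h1 := pvLoop_eq_g l.length l [] 0 rfl (by omega) (by simp)
  simp at h1
  rw [h1]
  show _ = pvH l 0
  exact pvG_eq_H l.length l 0 0 rfl rfl rfl
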